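-- pv_equiv track=rewrite | github.com/AESpider/steg | piet_interpreter.py | _choose_edge_codel
-- ===== SOURCE A (Python) =====
-- DP_VECS = [(1,0), (0,1), (-1,0), (0,-1)]
--
-- def _choose_edge_codel(pixels, dp, cc):
--     """Select edge codel based on DP and CC"""
--     dx, dy = DP_VECS[dp]
--
--     # Find codels furthest in DP direction
--     best_dp = None
--     candidates = []
--     for x, y in pixels:
--         val = x*dx + y*dy
--         if best_dp is None or val > best_dp:
--             best_dp = val
--             candidates = [(x, y)]
--         elif val == best_dp:
--             candidates.append((x, y))
--
--     # Among candidates, choose by CC (perpendicular to DP)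
--     cc_left = (-dy, dx)
--     cc_right = (dy, -dx)
--     cc_vec = cc_left if cc == 0 else cc_right
--
--     best_cc = None
--     chosen = candidates[0]
--     for x, y in candidates:
--         val = x*cc_vec[0] + y*cc_vec[1]
--         if best_cc is None or val > best_cc:
--             best_cc = val
--             chosen = (x, y)
--
--     return chosen
-- ===== SOURCE B (Python) =====
-- DP_VECS = [(1,0), (0,1), (-1,0), (0,-1)]
--
-- def _choose_edge_codel(pixels, dp, cc):
--     """Select edge codel based on DP and CC (single lexicographic pass)."""
--     dx, dy = DP_VECS[dp]
--     px, py = (-dy, dx) if cc == 0 else (dy, -dx)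
--     best = pixels[0]
--     best_key = (best[0]*dx + best[1]*dy, best[0]*px + best[1]*py)
--     for x, y in pixels[1:]:
--         key = (x*dx + y*dy, x*px + y*py)
--         if key > best_key:
--             best_key, best = key, (x, y)
--     return best
-- ===== Notes on version B (the rewrite author's own statement) =====
-- stated objective: simpler
-- what changed: Replaces A's two passes (collect all DP-furthest candidates into a list, then scan that list for the CC argmax) by one pass that keeps a single best codel under the lexicographic key (x*dx+y*dy, x*cc0+y*cc1) with strict '>' so the first-seen maximum wins.
import Mathlib
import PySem

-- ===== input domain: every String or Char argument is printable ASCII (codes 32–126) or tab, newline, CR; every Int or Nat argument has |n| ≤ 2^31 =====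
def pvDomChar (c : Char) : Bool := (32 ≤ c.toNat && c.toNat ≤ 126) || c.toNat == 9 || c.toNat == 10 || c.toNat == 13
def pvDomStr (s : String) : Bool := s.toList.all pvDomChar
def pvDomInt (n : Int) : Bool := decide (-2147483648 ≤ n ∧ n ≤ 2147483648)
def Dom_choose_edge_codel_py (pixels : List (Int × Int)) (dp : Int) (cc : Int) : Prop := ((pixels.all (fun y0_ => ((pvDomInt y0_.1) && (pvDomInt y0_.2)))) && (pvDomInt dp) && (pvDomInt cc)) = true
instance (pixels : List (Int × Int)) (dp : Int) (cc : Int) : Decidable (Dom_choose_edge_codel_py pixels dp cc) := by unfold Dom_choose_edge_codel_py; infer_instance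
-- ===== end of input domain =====

-- B replaces A's two passes by a single lexicographic-max pass; objective: simpler.
-- Equivalence is about the return value; both Pythons raise (IndexError) only outside Pre_.

-- ===== PORT A =====
def pvDPVecs : List (Int × Int) := [(1,0), (0,1), (-1,0), (0,-1)]

-- literal port of A: phase 1 collects DP-furthest candidates, phase 2 scans them by CC.
-- DP_VECS[dp] and candidates[0] raise IndexError outside Pre_; there the .getD/headD
-- defaults are never reached under Pre_.
def choose_edge_codel_py (pixels : List (Int × Int)) (dp : Int) (cc : Int) : Int × Int :=
  let dv := (PySem.List.pyGet? pvDPVecs dp).getD (0, 0)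
  let dx := dv.1
  let dy := dv.2
  let st := pixels.foldl (fun (st : Option Int × List (Int × Int)) p =>
      match st.1 with
      | none => (some (p.1 * dx + p.2 * dy), [p])
      | some m =>
        if p.1 * dx + p.2 * dy > m then (some (p.1 * dx + p.2 * dy), [p])
        else if p.1 * dx + p.2 * dy = m then (some m, st.2 ++ [p])
        else st) (none, [])
  let candidates := st.2
  let cc_vec : Int × Int := if cc = 0 then (-dy, dx) else (dy, -dx)
  let st2 := candidates.foldl (fun (st : Option Int × (Int × Int)) p =>
      match st.1 with
      | none => (some (p.1 * cc_vec.1 + p.2 * cc_vec.2), p)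
      | some m =>
        if p.1 * cc_vec.1 + p.2 * cc_vec.2 > m then (some (p.1 * cc_vec.1 + p.2 * cc_vec.2), p)
        else st) (none, candidates.headD (0, 0))
  st2.2

-- ===== PORT B =====
-- literal port of Source B: one pass keeping the best codel under the lexicographic key.
-- pixels[0] raises IndexError on [] (outside Pre_); the (0,0) branch is never reached under Pre_.
def choose_edge_codel_py_alt (pixels : List (Int × Int)) (dp : Int) (cc : Int) : Int × Int :=
  let dv := (PySem.List.pyGet? pvDPVecs dp).getD (0, 0)
  let dx := dv.1
  let dy := dv.2
  let pv : Int × Int := if cc = 0 then (-dy, dx) else (dy, -dx)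
  match pixels with
  | [] => (0, 0)
  | a :: rest =>
    (rest.foldl (fun (st : (Int × Int) × (Int × Int)) p =>
        let k : Int × Int := (p.1 * dx + p.2 * dy, p.1 * pv.1 + p.2 * pv.2)
        if st.1.1 < k.1 ∨ (st.1.1 = k.1 ∧ st.1.2 < k.2) then (k, p) else st)
      ((a.1 * dx + a.2 * dy, a.1 * pv.1 + a.2 * pv.2), a)).2

-- ===== PRECONDITION & SPEC =====
-- Pre_ excludes exactly the inputs where A raises IndexError: empty pixel lists
-- (candidates[0]) and dp outside the valid Python index range -4..3 of DP_VECS.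
def Pre_choose_edge_codel_py (pixels : List (Int × Int)) (dp : Int) (cc : Int) : Prop :=
  pixels ≠ [] ∧ -4 ≤ dp ∧ dp ≤ 3
instance (pixels : List (Int × Int)) (dp : Int) (cc : Int) : Decidable (Pre_choose_edge_codel_py pixels dp cc) := by unfold Pre_choose_edge_codel_py; infer_instance

def pvWitness_choose_edge_codel_py : (List (Int × Int)) × Int × Int := ([(0, 0), (2, 1), (2, 0)], 0, 1)

def Spec_choose_edge_codel_py (pixels : List (Int × Int)) (dp : Int) (cc : Int) (out : Int × Int) : Prop := out = choose_edge_codel_py_alt pixels dp cc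
instance (pixels : List (Int × Int)) (dp : Int) (cc : Int) (out : Int × Int) : Decidable (Spec_choose_edge_codel_py pixels dp cc out) := by unfold Spec_choose_edge_codel_py; infer_instance

-- ===== CLAIM (what is proved, stated in full; the proofs are below) =====
def Claim_equal_choose_edge_codel_py : Prop := ∀ (pixels : List (Int × Int)) (dp : Int) (cc : Int), Dom_choose_edge_codel_py pixels dp cc → Pre_choose_edge_codel_py pixels dp cc → Spec_choose_edge_codel_py pixels dp cc (choose_edge_codel_py pixels dp cc)

-- ===== LEMMAS AND PROOFS =====

-- named step functions (definitionally equal to the lambdas in the ports)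
def pvStepA (f : Int × Int → Int) (st : Option Int × List (Int × Int)) (p : Int × Int) :
    Option Int × List (Int × Int) :=
  match st.1 with
  | none => (some (f p), [p])
  | some m =>
    if f p > m then (some (f p), [p])
    else if f p = m then (some m, st.2 ++ [p])
    else st

def pvStep2' (g : Int × Int → Int) (st : Option Int × (Int × Int)) (p : Int × Int) :
    Option Int × (Int × Int) :=
  match st.1 with
  | none => (some (g p), p)
  | some m => if g p > m then (some (g p), p) else st

def pvStep2 (g : Int × Int → Int) (st : Int × (Int × Int)) (p : Int × Int) : Int × (Int × Int) :=
  if g p > st.1 then (g p, p) else st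

def pvStepB (f g : Int × Int → Int) (st : (Int × Int) × (Int × Int)) (p : Int × Int) :
    (Int × Int) × (Int × Int) :=
  if st.1.1 < f p ∨ (st.1.1 = f p ∧ st.1.2 < g p) then ((f p, g p), p) else st

lemma pvStepA_some (f : Int × Int → Int) (m : Int) (cs : List (Int × Int)) (p : Int × Int) :
    pvStepA f (some m, cs) p
      = (if f p > m then (some (f p), [p])
         else if f p = m then (some m, cs ++ [p]) else (some m, cs)) := rfl

-- A's phase-2 fold with an initialised Option state behaves like pvStep2
lemma pvPhase2_some (g : Int × Int → Int) :
    ∀ (cs : List (Int × Int)) (m : Int) (b : Int × Int),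
    cs.foldl (pvStep2' g) (some m, b)
      = (some (cs.foldl (pvStep2 g) (m, b)).1, (cs.foldl (pvStep2 g) (m, b)).2) := by
  intro cs
  induction cs with
  | nil => intro m b; simp
  | cons p cs ih =>
    intro m b
    simp only [List.foldl_cons, pvStep2, pvStep2']
    by_cases h : g p > m
    · simp [h, ih]
    · simp [h, ih]

-- main invariant: A's interleaved phase-1/phase-2 computation from state
-- (max m1, candidates c::cs) equals B's single lexicographic fold from the
-- state obtained by pre-running phase 2 on c::cs.
lemma pvMain (f g : Int × Int → Int) :
    ∀ (l : List (Int × Int)) (m1 : Int) (c : Int × Int) (cs : List (Int × Int)),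
    (let st := l.foldl (pvStepA f) (some m1, c :: cs)
     (st.2.foldl (pvStep2' g) (none, st.2.headD (0, 0))).2)
    = (l.foldl (pvStepB f g)
      ((m1, (cs.foldl (pvStep2 g) (g c, c)).1), (cs.foldl (pvStep2 g) (g c, c)).2)).2 := by
  intro l
  induction l with
  | nil =>
    intro m1 c cs
    simp only [List.foldl_nil, List.headD_cons, List.foldl_cons, pvStep2']
    simp [pvPhase2_some g cs (g c) c]
  | cons p l ih =>
    intro m1 c cs
    simp only [List.foldl_cons, pvStepA_some, pvStepB]
    by_cases h1 : f p > m1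
    · rw [if_pos h1, if_pos (Or.inl h1)]
      have := ih (f p) p []
      simpa using this
    · by_cases h2 : f p = m1
      · -- tie on the primary key: A appends p to the candidates
        rw [if_neg h1, if_pos h2]
        have := ih m1 c (cs ++ [p])
        rw [List.foldl_append] at this
        simp only [List.foldl_cons, List.foldl_nil] at this
        simp only [List.cons_append]
        rw [this]
        by_cases h3 : (cs.foldl (pvStep2 g) (g c, c)).1 < g p
        · rw [if_pos (Or.inr ⟨h2.symm, h3⟩)]
          simp [pvStep2, h3, gt_iff_lt, h2]
        · rw [if_neg (by rintro (h | ⟨_, h⟩); exacts [h1 (h2 ▸ h), h3 h])]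
          simp [pvStep2, gt_iff_lt, h3]
      · rw [if_neg h1, if_neg h2]
        rw [if_neg (by rintro (h | ⟨h, _⟩); exacts [h1 h, h2 h.symm])]
        exact ih m1 c cs

-- ===== VERDICT (by name: the statement is the Claim_ definition above) =====
theorem choose_edge_codel_py_spec : Claim_equal_choose_edge_codel_py := by
  intro pixels dp cc _ hpre
  obtain ⟨hne, _, _⟩ := hpre
  unfold Spec_choose_edge_codel_py choose_edge_codel_py choose_edge_codel_py_alt
  cases pixels with
  | nil => exact absurd rfl hne
  | cons a rest =>
    show (let st := rest.foldl (pvStepA _) (some _, [a])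
          (st.2.foldl (pvStep2' _) (none, st.2.headD (0, 0))).2) = _
    exact pvMain _ _ rest _ a []
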